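-- pv_equiv track=rewrite | github.com/Devdrm-osk931/Algorithm-Study | RealTests/TServer/6_만보기 랭킹.py | solution
-- ===== SOURCE A (Python) =====
-- def solution(steps_one, names_one, steps_two, names_two, steps_three, names_three):
--     answer = []
--     check = {}
--
--     concat = [[steps_one, names_one], [steps_two, names_two], [steps_three, names_three]]
--
--     # 각 날짜에 중복된 기록이 있는지 확인할 필요가 있다
--     for steps, names, in concat:
--         name_dist_dict = {}
--
--         for step, name in zip(steps, names):
--             if name not in name_dist_dict:
--                 name_dist_dict[name] = step
--             else:
--                 name_dist_dict[name] = max(name_dist_dict[name], step)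
--
--         for name, dist in name_dist_dict.items():
--             if name in check:
--                 check[name] += dist
--             else:
--                 check[name] = dist
--
--     for key, value in check.items():
--         answer.append((key, value))
--     answer.sort(key=lambda x:(-x[1], x[0]))
--     returnanswer = []
--     for person in answer:
--         returnanswer.append(person[0])
--
--     return returnanswer
-- ===== SOURCE B (Python) =====
-- def solution(steps_one, names_one, steps_two, names_two, steps_three, names_three):
--     # dict-free: ordered-dedup the names, then brute-force rescan each day's pairs per name
--     days = [list(zip(steps_one, names_one)),
--             list(zip(steps_two, names_two)),
--             list(zip(steps_three, names_three))]
--     order = []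
--     for day in days:
--         for _, name in day:
--             if name not in order:
--                 order.append(name)
--     def total(name):
--         t = 0
--         for day in days:
--             best = None
--             for step, nm in day:
--                 if nm == name and (best is None or step > best):
--                     best = step
--             if best is not None:
--                 t += best
--         return t
--     ranked = sorted(((name, total(name)) for name in order), key=lambda p: (-p[1], p[0]))
--     return [name for name, _ in ranked]
-- ===== Notes on version B (the rewrite author's own statement) =====
-- stated objective: alternative
-- what changed: Removes all dicts: B ordered-dedups the names once and then brute-force rescans each day's (step, name) pairs per name to find its best value, instead of A's incremental per-day hash dicts merged into a running accumulator; it trades O(n) hashing for O(k*n) scans.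
import Mathlib
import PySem

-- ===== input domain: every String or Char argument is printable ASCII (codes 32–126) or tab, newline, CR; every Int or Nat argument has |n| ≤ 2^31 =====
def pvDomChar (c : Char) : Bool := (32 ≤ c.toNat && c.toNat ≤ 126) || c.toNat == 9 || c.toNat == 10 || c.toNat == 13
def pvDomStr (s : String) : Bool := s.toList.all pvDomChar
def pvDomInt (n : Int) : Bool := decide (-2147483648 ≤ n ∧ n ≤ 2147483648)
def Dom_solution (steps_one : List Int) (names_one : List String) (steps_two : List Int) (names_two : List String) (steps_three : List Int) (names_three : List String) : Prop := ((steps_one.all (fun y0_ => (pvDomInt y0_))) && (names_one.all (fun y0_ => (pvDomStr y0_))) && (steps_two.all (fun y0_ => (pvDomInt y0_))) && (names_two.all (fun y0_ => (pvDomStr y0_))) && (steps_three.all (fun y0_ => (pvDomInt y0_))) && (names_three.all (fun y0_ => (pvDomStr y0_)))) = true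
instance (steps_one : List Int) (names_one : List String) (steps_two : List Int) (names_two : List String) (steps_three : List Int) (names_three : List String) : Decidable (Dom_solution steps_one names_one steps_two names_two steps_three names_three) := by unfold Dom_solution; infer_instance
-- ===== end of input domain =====

-- B removes A's dicts entirely: it ordered-dedups the names once and brute-force rescans each
-- day's (step, name) pairs per name for its best value; alternative algorithm, no speed claim.


-- ===== PORT A =====
-- per-day inner loop body: name_dist_dict[name] = step / max(name_dist_dict[name], step)
def aDayStep (d : PySem.Dict String Int) (p : Int × String) : PySem.Dict String Int :=
  if d.contains p.2 then d.insert p.2 (max (d.getD p.2 0) p.1) else d.insert p.2 p.1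

-- merge loop body: check[name] += dist / check[name] = dist
def aMergeStep (c : PySem.Dict String Int) (q : String × Int) : PySem.Dict String Int :=
  if c.contains q.1 then c.insert q.1 (c.getD q.1 0 + q.2) else c.insert q.1 q.2

def solution (steps_one : List Int) (names_one : List String) (steps_two : List Int) (names_two : List String) (steps_three : List Int) (names_three : List String) : List String :=
  let concat := [(steps_one, names_one), (steps_two, names_two), (steps_three, names_three)]
  let check := concat.foldl
    (fun check dn =>
      let name_dist_dict := (dn.1.zip dn.2).foldl aDayStep PySem.Dict.empty
      name_dist_dict.items.foldl aMergeStep check)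
    PySem.Dict.empty
  let answer := check.items.foldl (fun ans q => ans ++ [(q.1, q.2)]) []
  let answer2 := PySem.List.sorted2 answer (fun x => -x.2) (fun x => x.1) false
  answer2.foldl (fun r person => r ++ [person.1]) []

-- ===== PORT B =====
-- inner loop of total(): best = None; ... if nm == name and (best is None or step > best): best = step
def bBest (n : String) (day : List (Int × String)) : Option Int :=
  day.foldl (fun best p =>
    if p.2 == n && (best.isNone || decide (best.getD 0 < p.1)) then some p.1 else best) none

-- total(name): t = 0; for day in days: ... if best is not None: t += best
def bTotal (days : List (List (Int × String))) (n : String) : Int :=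
  days.foldl (fun t day => match bBest n day with | none => t | some b => t + b) 0

def solution_alt (steps_one : List Int) (names_one : List String) (steps_two : List Int) (names_two : List String) (steps_three : List Int) (names_three : List String) : List String :=
  let days := [steps_one.zip names_one, steps_two.zip names_two, steps_three.zip names_three]
  let order := days.foldl (fun o day => day.foldl (fun o p => PySem.Set.add o p.2) o) PySem.Set.empty
  let ranked := PySem.List.sorted2 (order.map (fun n => (n, bTotal days n))) (fun p => -p.2) (fun p => p.1) false
  ranked.map (fun p => p.1)

-- ===== PRECONDITION & SPEC =====
def Spec_solution (steps_one : List Int) (names_one : List String) (steps_two : List Int) (names_two : List String) (steps_three : List Int) (names_three : List String) (out : List String) : Prop := out = solution_alt steps_one names_one steps_two names_two steps_three names_three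
instance (steps_one : List Int) (names_one : List String) (steps_two : List Int) (names_two : List String) (steps_three : List Int) (names_three : List String) (out : List String) : Decidable (Spec_solution steps_one names_one steps_two names_two steps_three names_three out) := by unfold Spec_solution; infer_instance

-- ===== CLAIM (what is proved, stated in full; the proofs are below) =====
def Claim_equal_solution : Prop := ∀ (steps_one : List Int) (names_one : List String) (steps_two : List Int) (names_two : List String) (steps_three : List Int) (names_three : List String), Dom_solution steps_one names_one steps_two names_two steps_three names_three → Spec_solution steps_one names_one steps_two names_two steps_three names_three (solution steps_one names_one steps_two names_two steps_three names_three)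

-- ===== LEMMAS AND PROOFS =====

-- the steps recorded for name n in one day's (step, name) pair list
def stepsOf (l : List (Int × String)) (n : String) : List Int :=
  (l.filter (fun p => p.2 == n)).map (fun p => p.1)

-- the day's best (max) value for a name, none if the name is absent that day
def dayBest (l : List (Int × String)) (n : String) : Option Int :=
  match stepsOf l n with
  | [] => none
  | m :: ms => some (ms.foldl max (max m m))

-- the two A loop bodies as single inserts (for the keys/nodup lemmas)
theorem aDayStep_eq : aDayStep = fun d p =>
    d.insert p.2 (if d.contains p.2 then max (d.getD p.2 0) p.1 else p.1) := by
  funext d p; unfold aDayStep; by_cases h : d.contains p.2 <;> simp [h]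

theorem aMergeStep_eq : aMergeStep = fun c q =>
    c.insert q.1 (if c.contains q.1 then c.getD q.1 0 + q.2 else q.2) := by
  funext c q; unfold aMergeStep; by_cases h : c.contains q.1 <;> simp [h]

-- A's append-loops are maps
theorem foldl_append_pair (l : List (String × Int)) (acc : List (String × Int)) :
    l.foldl (fun ans q => ans ++ [(q.1, q.2)]) acc = acc ++ l := by
  induction l generalizing acc with
  | nil => simp
  | cons p t ih => simp [List.foldl, ih]

theorem foldl_append_fst (l : List (String × Int)) (acc : List String) :
    l.foldl (fun r person => r ++ [person.1]) acc = acc ++ l.map (fun p => p.1) := by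
  induction l generalizing acc with
  | nil => simp
  | cons p t ih => simp [List.foldl, ih]

theorem stepsOf_cons_eq (p : Int × String) (t : List (Int × String)) :
    stepsOf (p :: t) p.2 = p.1 :: stepsOf t p.2 := by
  simp [stepsOf]

theorem stepsOf_cons_ne (p : Int × String) (t : List (Int × String)) (n : String)
    (h : ¬ p.2 = n) : stepsOf (p :: t) n = stepsOf t n := by
  simp [stepsOf, h]

-- A's per-day dict, looked up at n
theorem aDay_get? (l : List (Int × String)) (d : PySem.Dict String Int) (n : String) :
    (l.foldl aDayStep d).get? n =
      match stepsOf l n with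
      | [] => d.get? n
      | m :: ms => some (ms.foldl max (max ((d.get? n).getD m) m)) := by
  induction l generalizing d with
  | nil => simp [stepsOf]
  | cons p t ih =>
    simp only [List.foldl]
    by_cases hp : p.2 = n
    · subst hp
      have hsv : (aDayStep d p).get? p.2 = some (max ((d.get? p.2).getD p.1) p.1) := by
        unfold aDayStep
        rcases hg : d.get? p.2 with _ | a
        · have hc : d.contains p.2 = false := by
            rw [PySem.Dict.contains_eq_isSome_get?, hg]; rfl
          simp [hc, PySem.Dict.get?_insert_self]
        · have hc : d.contains p.2 = true := by
            rw [PySem.Dict.contains_eq_isSome_get?, hg]; rfl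
          have hd : d.getD p.2 0 = a := PySem.Dict.getD_of_get?_eq_some d 0 hg
          simp [hc, PySem.Dict.get?_insert_self, hd]
      rw [ih (aDayStep d p)]
      rcases hs : stepsOf t p.2 with _ | ⟨m, ms⟩
      · simp [stepsOf_cons_eq, hs, hsv]
      · simp [stepsOf_cons_eq, hs, hsv, List.foldl]
    · have h2 : (aDayStep d p).get? n = d.get? n := by
        unfold aDayStep
        have hne : n ≠ p.2 := fun h => hp h.symm
        split <;> rw [PySem.Dict.get?_insert, if_neg hne]
      rw [ih (aDayStep d p), h2, stepsOf_cons_ne _ _ _ hp]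

theorem dayD_get? (l : List (Int × String)) (n : String) :
    (l.foldl aDayStep PySem.Dict.empty).get? n = dayBest l n := by
  rw [aDay_get?]; unfold dayBest
  rcases hs : stepsOf l n with _ | ⟨m, ms⟩ <;> simp [PySem.Dict.get?_empty]

-- A's merge loop adds the matching values
theorem merge_getD (l : List (String × Int)) (c : PySem.Dict String Int) (n : String) :
    (l.foldl aMergeStep c).getD n 0 =
      c.getD n 0 + ((l.filter (fun q => q.1 == n)).map (fun q => q.2)).sum := by
  induction l generalizing c with
  | nil => simp
  | cons q t ih =>
    simp only [List.foldl]
    by_cases hq : q.1 = n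
    · subst hq
      have hc' : (aMergeStep c q).getD q.1 0 = c.getD q.1 0 + q.2 := by
        unfold aMergeStep
        by_cases hcb : c.contains q.1 = true
        · rw [if_pos hcb, PySem.Dict.getD_insert_self]
        · rw [if_neg hcb, PySem.Dict.getD_insert_self,
            PySem.Dict.getD_of_not_contains c 0 (by simpa using hcb)]
          ring
      rw [ih (aMergeStep c q), hc']
      rw [List.filter_cons_of_pos (by simp)]
      simp only [List.map_cons, List.sum_cons]
      ring
    · have h2 : (aMergeStep c q).getD n 0 = c.getD n 0 := by
        unfold aMergeStep
        have hne : n ≠ q.1 := fun h => hq h.symm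
        split <;> rw [PySem.Dict.getD_insert, if_neg hne]
      rw [ih (aMergeStep c q), h2]
      rw [List.filter_cons_of_neg (by simp [hq])]

theorem filter_nil_of_not_mem (l : List (String × Int)) (n : String)
    (h : n ∉ l.map (fun q => q.1)) : l.filter (fun q => q.1 == n) = [] := by
  rw [List.filter_eq_nil_iff]
  intro a ha
  simp only [beq_iff_eq]
  intro hx
  exact h (by exact List.mem_map.mpr ⟨a, ha, hx⟩)

theorem filter_singleton (l : List (String × Int)) (n : String) (v : Int)
    (hmem : (n, v) ∈ l) (hnd : (l.map (fun q => q.1)).Nodup) :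
    l.filter (fun q => q.1 == n) = [(n, v)] := by
  induction l with
  | nil => simp at hmem
  | cons q t ih =>
    rcases List.mem_cons.mp hmem with hq | hq
    · subst hq
      simp only [List.map_cons, List.nodup_cons] at hnd
      rw [List.filter_cons_of_pos (by simp), filter_nil_of_not_mem t n hnd.1]
    · have hne : q.1 ≠ n := by
        simp only [List.map_cons, List.nodup_cons] at hnd
        intro he
        exact hnd.1 (he ▸ List.mem_map.mpr ⟨(n, v), hq, rfl⟩)
      rw [List.filter_cons_of_neg (by simp [hne])]
      exact ih hq (by simp only [List.map_cons, List.nodup_cons] at hnd; exact hnd.2)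

-- on a dict with distinct keys, the matching-value sum of its items is the lookup
theorem filter_sum_eq (d : PySem.Dict String Int) (n : String) (hnd : d.keys.Nodup) :
    ((d.items.filter (fun q => q.1 == n)).map (fun q => q.2)).sum = (d.get? n).getD 0 := by
  rcases hg : d.get? n with _ | v
  · have hnm : n ∉ d.items.map (fun q => q.1) := by
      rw [PySem.Dict.get?_eq_none_iff_not_mem_keys] at hg
      simpa [PySem.Dict.keys] using hg
    rw [filter_nil_of_not_mem _ _ hnm]; rfl
  · have hmem : (n, v) ∈ d.items := PySem.Dict.mem_items_of_get?_eq_some d hg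
    rw [filter_singleton d.items n v hmem (by simpa [PySem.Dict.keys] using hnd)]
    simp

theorem update_ofList (s : PySem.Set String) (noms : List String) :
    PySem.Set.update s (PySem.Set.ofList noms) = PySem.Set.update s noms := by
  rw [PySem.Set.update_eq_append_filter, PySem.Set.update_eq_append_filter,
    PySem.Set.ofList_ofList]

-- B's inner scan, started from a found value, computes the running max of the matching steps
theorem bBest_go (l : List (Int × String)) (n : String) (v : Int) :
    l.foldl (fun best p =>
      if p.2 == n && (best.isNone || decide (best.getD 0 < p.1)) then some p.1 else best) (some v)
    = some ((stepsOf l n).foldl max v) := by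
  induction l generalizing v with
  | nil => simp [stepsOf]
  | cons p t ih =>
    simp only [List.foldl]
    by_cases hp : p.2 = n
    · subst hp
      rw [stepsOf_cons_eq]
      by_cases hlt : v < p.1
      · simp only [beq_self_eq_true, Option.isNone_some, Option.getD_some, hlt, decide_true,
          Bool.true_and, Bool.false_or, if_pos]
        rw [ih p.1, List.foldl_cons, max_eq_right (le_of_lt hlt)]
      · simp only [beq_self_eq_true, Option.isNone_some, Option.getD_some, hlt, decide_false,
          Bool.true_and, Bool.false_or, if_neg, Bool.false_eq_true, not_false_iff]
        rw [ih v, List.foldl_cons, max_eq_left (le_of_not_gt hlt)]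
    · have hb : (p.2 == n) = false := by simpa using hp
      rw [stepsOf_cons_ne _ _ _ hp]
      simp only [hb, Bool.false_and, Bool.false_eq_true, if_neg, not_false_iff]
      exact ih v
  
-- B's inner scan computes the day's best
theorem bBest_eq_dayBest (l : List (Int × String)) (n : String) :
    bBest n l = dayBest l n := by
  unfold bBest
  induction l with
  | nil => simp [dayBest, stepsOf]
  | cons p t ih =>
    simp only [List.foldl]
    by_cases hp : p.2 = n
    · subst hp
      simp only [beq_self_eq_true, Option.isNone_none, Bool.true_and, Bool.true_or, if_pos]
      rw [bBest_go t p.2 p.1]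
      unfold dayBest
      rw [stepsOf_cons_eq]
      simp [max_self]
    · have hb : (p.2 == n) = false := by simpa using hp
      simp only [hb, Bool.false_and, Bool.false_eq_true, if_neg, not_false_iff]
      rw [ih]
      unfold dayBest
      rw [stepsOf_cons_ne _ _ _ hp]

-- B's total over the three days is the sum of the days' bests
theorem bTotal_eq (l1 l2 l3 : List (Int × String)) (n : String) :
    bTotal [l1, l2, l3] n
      = (dayBest l1 n).getD 0 + (dayBest l2 n).getD 0 + (dayBest l3 n).getD 0 := by
  unfold bTotal
  simp only [List.foldl]
  rw [bBest_eq_dayBest, bBest_eq_dayBest, bBest_eq_dayBest]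
  rcases dayBest l1 n with _ | a <;> rcases dayBest l2 n with _ | b <;>
    rcases dayBest l3 n with _ | c <;> simp <;> omega

-- B's dedup loop over one day is a Set.update with the day's names
theorem bOrder_day (day : List (Int × String)) (o : PySem.Set String) :
    day.foldl (fun o p => PySem.Set.add o p.2) o
      = PySem.Set.update o (day.map (fun p => p.2)) := by
  rw [PySem.Set.update, List.foldl_map]

-- the pair list A sorts equals the pair list B sorts
theorem lists_eq (l1 l2 l3 : List (Int × String)) :
    ((((l1.foldl aDayStep PySem.Dict.empty).items.foldl aMergeStep PySem.Dict.empty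
       |> (l2.foldl aDayStep PySem.Dict.empty).items.foldl aMergeStep)
       |> (l3.foldl aDayStep PySem.Dict.empty).items.foldl aMergeStep)).items
    = ([l1, l2, l3].foldl (fun o day => day.foldl (fun o p => PySem.Set.add o p.2) o)
         PySem.Set.empty).map (fun n => (n, bTotal [l1, l2, l3] n)) := by
  have hndA : ∀ l : List (Int × String), (l.foldl aDayStep PySem.Dict.empty).keys.Nodup := by
    intro l
    rw [aDayStep_eq]
    exact PySem.Dict.nodup_keys_foldl_insert_key _ _ _ _ PySem.Dict.nodup_keys_empty
  have hndC : ((((l1.foldl aDayStep PySem.Dict.empty).items.foldl aMergeStep PySem.Dict.empty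
       |> (l2.foldl aDayStep PySem.Dict.empty).items.foldl aMergeStep)
       |> (l3.foldl aDayStep PySem.Dict.empty).items.foldl aMergeStep)).keys.Nodup := by
    rw [aMergeStep_eq]
    exact PySem.Dict.nodup_keys_foldl_insert_key _ _ _ _
      (PySem.Dict.nodup_keys_foldl_insert_key _ _ _ _
        (PySem.Dict.nodup_keys_foldl_insert_key _ _ _ _ PySem.Dict.nodup_keys_empty))
  have hmapkeys : ∀ d : PySem.Dict String Int, d.items.map (fun q => q.1) = d.keys := fun _ => rfl
  have hkeysA : ∀ l : List (Int × String),
      (l.foldl aDayStep PySem.Dict.empty).keys = PySem.Set.ofList (l.map (fun p => p.2)) := by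
    intro l
    rw [aDayStep_eq, PySem.Dict.keys_foldl_insert_key, PySem.Dict.keys_empty,
      PySem.Set.update_nil_left]
  -- the key lists agree
  have hkeys : ((((l1.foldl aDayStep PySem.Dict.empty).items.foldl aMergeStep PySem.Dict.empty
       |> (l2.foldl aDayStep PySem.Dict.empty).items.foldl aMergeStep)
       |> (l3.foldl aDayStep PySem.Dict.empty).items.foldl aMergeStep)).keys
      = [l1, l2, l3].foldl (fun o day => day.foldl (fun o p => PySem.Set.add o p.2) o)
          PySem.Set.empty := by
    rw [aMergeStep_eq]
    rw [PySem.Dict.keys_foldl_insert_key, PySem.Dict.keys_foldl_insert_key,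
      PySem.Dict.keys_foldl_insert_key, PySem.Dict.keys_empty]
    rw [hmapkeys, hmapkeys, hmapkeys, hkeysA l1, hkeysA l2, hkeysA l3]
    simp only [List.foldl]
    rw [bOrder_day l1, bOrder_day l2, bOrder_day l3]
    simp only [update_ofList, PySem.Set.ofList_ofList]
    rfl
  -- the values agree pointwise
  have hval : ∀ n : String,
      ((((l1.foldl aDayStep PySem.Dict.empty).items.foldl aMergeStep PySem.Dict.empty
       |> (l2.foldl aDayStep PySem.Dict.empty).items.foldl aMergeStep)
       |> (l3.foldl aDayStep PySem.Dict.empty).items.foldl aMergeStep)).getD n 0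
      = bTotal [l1, l2, l3] n := by
    intro n
    rw [merge_getD, merge_getD, merge_getD, PySem.Dict.getD_empty]
    rw [filter_sum_eq _ n (hndA l1), filter_sum_eq _ n (hndA l2), filter_sum_eq _ n (hndA l3)]
    rw [dayD_get? l1 n, dayD_get? l2 n, dayD_get? l3 n, bTotal_eq]
    ring
  rw [PySem.Dict.items_eq_map_keys _ hndC 0, hkeys]
  apply List.map_congr_left
  intro k _
  rw [hval k]

-- ===== VERDICT (by name: the statement is the Claim_ definition above) =====
theorem solution_spec : Claim_equal_solution := by
  intro s1 n1 s2 n2 s3 n3 _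
  unfold Spec_solution solution solution_alt
  simp only [List.foldl_cons, List.foldl_nil]
  rw [foldl_append_pair, foldl_append_fst]
  have h := lists_eq (s1.zip n1) (s2.zip n2) (s3.zip n3)
  simp only [List.foldl_cons, List.foldl_nil] at h
  rw [h]
  simp
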